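-- pv_equiv track=rewrite | github.com/Performant-Labs/rental_collector | dashboard/app/ingestion.py | idempotent_upsert_documents
-- ===== SOURCE A (Python) =====
-- from typing import Any
--
-- def idempotent_upsert_documents(
--     existing_documents: list[dict[str, Any]],
--     new_documents: list[dict[str, Any]],
-- ) -> list[dict[str, Any]]:
--     merged: dict[str, dict[str, Any]] = {
--         document["id"]: dict(document)
--         for document in existing_documents
--         if document.get("id")
--     }
--
--     for document in new_documents:
--         if not document.get("id"):
--             continue
--         merged[document["id"]] = dict(document)
--
--     return [merged[key] for key in sorted(merged.keys())]
-- ===== SOURCE B (Python) =====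
-- def idempotent_upsert_documents(existing_documents, new_documents):
--     docs = [d for d in existing_documents + new_documents if d.get("id")]
--     ids = sorted({d["id"] for d in docs})
--     result = []
--     for key in ids:
--         for d in reversed(docs):
--             if d["id"] == key:
--                 result.append(dict(d))
--                 break
--     return result
-- ===== Notes on version B (the rewrite author's own statement) =====
-- stated objective: alternative
-- what changed: Replaces A's incremental dict upsert (build id-keyed dict, overwrite, then sort keys and look each one up) by filter-both-lists, sort the distinct ids, and for each id take the last matching document by a reverse scan of the concatenated filtered list.
import Mathlib
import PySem

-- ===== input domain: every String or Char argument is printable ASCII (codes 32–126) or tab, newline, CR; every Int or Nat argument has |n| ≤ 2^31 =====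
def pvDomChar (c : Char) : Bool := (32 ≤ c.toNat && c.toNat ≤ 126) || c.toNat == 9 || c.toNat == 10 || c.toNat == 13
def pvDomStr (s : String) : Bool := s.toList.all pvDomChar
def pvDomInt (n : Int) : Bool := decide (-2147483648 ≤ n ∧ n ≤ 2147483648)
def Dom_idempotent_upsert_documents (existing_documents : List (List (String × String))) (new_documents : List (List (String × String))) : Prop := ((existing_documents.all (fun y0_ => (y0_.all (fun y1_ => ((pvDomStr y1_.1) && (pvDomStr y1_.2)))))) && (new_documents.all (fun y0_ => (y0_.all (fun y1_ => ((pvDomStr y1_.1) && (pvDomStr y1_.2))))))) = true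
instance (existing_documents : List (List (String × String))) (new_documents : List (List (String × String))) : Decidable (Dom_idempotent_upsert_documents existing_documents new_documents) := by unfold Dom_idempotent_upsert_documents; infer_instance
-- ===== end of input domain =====

-- B replaces A's id-keyed dict upsert by: filter both lists, sort the distinct ids, and take the
-- last matching document per id by a reverse scan (alternative decomposition, no speed claim).


-- ===== PORT A =====
-- A Python dict value arriving as an assoc list is read through PySem.Dict.ofList (dict semantics:
-- first position, last value); document.get("id") is truthy iff the stored string is nonempty.
def idempotent_upsert_documents (existing_documents : List (List (String × String))) (new_documents : List (List (String × String))) : List (List (String × String)) :=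
  let merged0 : PySem.Dict String (List (String × String)) :=
    existing_documents.foldl (fun m doc =>
      if (PySem.Dict.ofList doc).getD "id" "" ≠ "" then
        m.insert ((PySem.Dict.ofList doc).getD "id" "") (PySem.Dict.ofList doc).items
      else m) PySem.Dict.empty
  let merged : PySem.Dict String (List (String × String)) :=
    new_documents.foldl (fun m doc =>
      if (PySem.Dict.ofList doc).getD "id" "" ≠ "" then
        m.insert ((PySem.Dict.ofList doc).getD "id" "") (PySem.Dict.ofList doc).items
      else m) merged0
  (PySem.List.sorted merged.keys (fun k => k) false).map (fun k => merged.getD k [])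

-- ===== PORT B =====
def idempotent_upsert_documents_alt (existing_documents : List (List (String × String))) (new_documents : List (List (String × String))) : List (List (String × String)) :=
  let docs := ((existing_documents ++ new_documents).map (fun d => PySem.Dict.ofList d)).filter
      (fun d => d.getD "id" "" != "")
  let ids := PySem.List.sorted (PySem.Set.ofList (docs.map (fun d => d.getD "id" ""))) (fun k => k) false
  ids.filterMap (fun k => (docs.reverse.find? (fun d => d.getD "id" "" == k)).map (fun d => d.items))

-- ===== PRECONDITION & SPEC =====
def Spec_idempotent_upsert_documents (existing_documents : List (List (String × String))) (new_documents : List (List (String × String))) (out : List (List (String × String))) : Prop := out = idempotent_upsert_documents_alt existing_documents new_documents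
instance (existing_documents : List (List (String × String))) (new_documents : List (List (String × String))) (out : List (List (String × String))) : Decidable (Spec_idempotent_upsert_documents existing_documents new_documents out) := by unfold Spec_idempotent_upsert_documents; infer_instance

-- ===== CLAIM (what is proved, stated in full; the proofs are below) =====
def Claim_equal_idempotent_upsert_documents : Prop := ∀ (existing_documents : List (List (String × String))) (new_documents : List (List (String × String))), Dom_idempotent_upsert_documents existing_documents new_documents → Spec_idempotent_upsert_documents existing_documents new_documents (idempotent_upsert_documents existing_documents new_documents)

-- ===== LEMMAS AND PROOFS =====

-- A's filtered upsert loop is the plain insert loop over the filtered, dict-converted list.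
theorem pv_foldA_eq (l : List (List (String × String))) (m : PySem.Dict String (List (String × String))) :
    l.foldl (fun m doc =>
      if (PySem.Dict.ofList doc).getD "id" "" ≠ "" then
        m.insert ((PySem.Dict.ofList doc).getD "id" "") (PySem.Dict.ofList doc).items
      else m) m
    = ((l.map (fun d => PySem.Dict.ofList d)).filter (fun d => d.getD "id" "" != "")).foldl
        (fun m d => m.insert (d.getD "id" "") d.items) m := by
  induction l generalizing m with
  | nil => rfl
  | cons doc rest ih =>
      by_cases h : (PySem.Dict.ofList doc).getD "id" "" = ""
      · simpa [List.foldl_cons, h] using ih m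
      · simpa [List.foldl_cons, h] using
          ih (m.insert ((PySem.Dict.ofList doc).getD "id" "") (PySem.Dict.ofList doc).items)

-- lookup in the plain insert loop = last matching document in the list.
theorem pv_fold_get? (l : List (PySem.Dict String String)) (m : PySem.Dict String (List (String × String))) (i : String) :
    ((l.foldl (fun m d => m.insert (d.getD "id" "") d.items) m).get? i)
    = match l.reverse.find? (fun d => d.getD "id" "" == i) with
      | some d => some d.items
      | none => m.get? i := by
  induction l generalizing m with
  | nil => rfl
  | cons d rest ih =>
      rw [List.foldl_cons, ih, List.reverse_cons, List.find?_append]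
      cases hf : rest.reverse.find? (fun d => d.getD "id" "" == i) with
      | some e => simp
      | none =>
          by_cases hk : d.getD "id" "" = i
          · simp [List.find?, hk]
          · have hb : (d.getD "id" "" == i) = false := by simp [hk]
            simp [List.find?, hb, PySem.Dict.get?_insert, Ne.symm hk]

-- mapping getD over ids that all occur equals the reverse-scan filterMap.
theorem pv_out_eq (docs : List (PySem.Dict String String))
    (merged : PySem.Dict String (List (String × String)))
    (hget : ∀ i, merged.get? i
      = match docs.reverse.find? (fun d => d.getD "id" "" == i) with
        | some d => some d.items
        | none => none) :
    ∀ ids : List String, (∀ k ∈ ids, ∃ d ∈ docs, d.getD "id" "" = k) →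
      ids.map (fun k => merged.getD k [])
      = ids.filterMap (fun k => (docs.reverse.find? (fun d => d.getD "id" "" == k)).map (fun d => d.items)) := by
  intro ids
  induction ids with
  | nil => intro _; rfl
  | cons k rest ih =>
      intro hmem
      obtain ⟨d, hd, hk⟩ := hmem k (by simp)
      cases hf : docs.reverse.find? (fun d => d.getD "id" "" == k) with
      | none =>
          exfalso
          have := List.find?_eq_none.mp hf d (by simpa using hd)
          simp [hk] at this
      | some e =>
          have hgk : merged.getD k [] = e.items := by
            rw [PySem.Dict.getD_eq_get?_getD, hget k, hf]
            rfl
          simp only [List.map_cons, List.filterMap_cons, hf, Option.map_some, hgk]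
          exact congrArg _ (ih (fun x hx => hmem x (by simp [hx])))

-- ===== VERDICT (by name: the statement is the Claim_ definition above) =====
theorem idempotent_upsert_documents_spec : Claim_equal_idempotent_upsert_documents := by
  intro existing_documents new_documents _
  unfold Spec_idempotent_upsert_documents idempotent_upsert_documents idempotent_upsert_documents_alt
  simp only [← List.foldl_append, pv_foldA_eq, List.map_append, List.filter_append]
  set docs := ((existing_documents.map (fun d => PySem.Dict.ofList d)).filter
        (fun d => d.getD "id" "" != "")) ++
      ((new_documents.map (fun d => PySem.Dict.ofList d)).filter
        (fun d => d.getD "id" "" != "")) with hdocs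
  set merged := docs.foldl (fun m d => m.insert (d.getD "id" "") d.items) PySem.Dict.empty with hm
  have hkeys : merged.keys = PySem.Set.ofList (docs.map (fun d => d.getD "id" "")) := by
    rw [hm, PySem.Dict.keys_foldl_insert_key]
    simp [PySem.Dict.keys_empty, PySem.Set.ofList, PySem.Set.update]
  rw [hkeys]
  simp only [← List.map_append]
  apply pv_out_eq
  · intro i
    rw [hm, pv_fold_get? docs PySem.Dict.empty i]
    cases docs.reverse.find? (fun d => d.getD "id" "" == i) <;> simp [PySem.Dict.get?_empty]
  · intro k hk
    have : k ∈ docs.map (fun d => d.getD "id" "") := by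
      have := (PySem.List.mem_sorted _ _ _ _).mp hk
      simpa [PySem.Set.mem_ofList] using this
    obtain ⟨d, hd, hkd⟩ := List.mem_map.mp this
    exact ⟨d, hd, hkd⟩
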